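-- pv_equiv track=rewrite | github.com/Medvedinca/triangulatin-python | triangulation.py | find_adjacent_triangles
-- ===== SOURCE A (Python) =====
-- def find_adjacent_triangles(triangles):
--     """
--     Функция находит все пары треугольников из массива triangles, которые имеют общее ребро.
--     Возвращает список кортежей, каждый из которых содержит два треугольника с общим ребром.
--     """
--     adjacent_triangles = []
--     for i in range(len(triangles)):
--         for j in range(i+1, len(triangles)):
--             shared_vertices = set(triangles[i]).intersection(set(triangles[j]))
--             if len(shared_vertices) == 2:
--                 adjacent_triangles.append((triangles[i], triangles[j]))
--     return adjacent_triangles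
-- ===== SOURCE B (Python) =====
-- def find_adjacent_triangles(triangles):
--     # Index each distinct vertex to the (increasing) list of triangles containing it,
--     # count, per triangle pair, the vertices they share, and emit pairs sharing exactly 2.
--     owners = {}
--     for idx, t in enumerate(triangles):
--         for v in dict.fromkeys(t):
--             owners.setdefault(v, []).append(idx)
--     pairs = []
--     for idxs in owners.values():
--         for a in range(len(idxs)):
--             for b in range(a + 1, len(idxs)):
--                 pairs.append((idxs[a], idxs[b]))
--     cnt = {}
--     for p in pairs:
--         cnt[p] = cnt.get(p, 0) + 1
--     return [(triangles[i], triangles[j]) for (i, j) in sorted(cnt) if cnt[(i, j)] == 2]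
-- ===== Notes on version B (the rewrite author's own statement) =====
-- stated objective: alternative
-- what changed: Replaces the all-pairs set-intersection scan by an inverted index: vertex -> increasing list of triangle indices, one co-occurrence per shared vertex is counted in a dict keyed by the index pair, and pairs with count exactly 2 are emitted in sorted (i,j) order, which equals A's enumeration order.
import Mathlib
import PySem

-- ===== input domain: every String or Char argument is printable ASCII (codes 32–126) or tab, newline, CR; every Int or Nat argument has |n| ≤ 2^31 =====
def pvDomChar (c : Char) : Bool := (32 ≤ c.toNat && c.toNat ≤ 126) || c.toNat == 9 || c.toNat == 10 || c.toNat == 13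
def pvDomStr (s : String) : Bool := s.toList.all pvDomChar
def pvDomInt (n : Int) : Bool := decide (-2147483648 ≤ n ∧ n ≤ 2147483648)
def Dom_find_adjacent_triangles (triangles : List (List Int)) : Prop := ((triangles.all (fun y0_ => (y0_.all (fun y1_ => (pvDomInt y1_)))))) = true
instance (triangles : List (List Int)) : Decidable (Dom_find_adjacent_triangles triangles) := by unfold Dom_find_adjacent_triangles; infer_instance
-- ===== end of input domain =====

-- B replaces A's all-pairs set-intersection scan by an inverted index (vertex -> triangles),
-- counting shared vertices per co-occurring pair and sorting the candidate pairs (alternative algorithm).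

-- ===== PORT A =====
def find_adjacent_triangles (triangles : List (List Int)) : List (List Int × List Int) :=
  (PySem.List.pyRange 0 (triangles.length : Int) 1).foldl (fun acc i =>
    (PySem.List.pyRange (i + 1) (triangles.length : Int) 1).foldl (fun acc j =>
      let ti := PySem.List.pyGetD triangles i []
      let tj := PySem.List.pyGetD triangles j []
      if PySem.Set.len (PySem.Set.inter (PySem.Set.ofList ti) (PySem.Set.ofList tj)) = 2 then
        acc ++ [(ti, tj)]
      else acc) acc) []

-- ===== PORT B =====
def find_adjacent_triangles_alt (triangles : List (List Int)) : List (List Int × List Int) :=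
  let owners : PySem.Dict Int (List Int) :=
    (PySem.List.enumerate triangles 0).foldl (fun d e =>
      (PySem.List.dedup e.2).foldl (fun d v => d.insert v (d.getD v [] ++ [e.1])) d) PySem.Dict.empty
  let pairs : List (Int × Int) :=
    owners.values.foldl (fun acc idxs =>
      (PySem.List.pyRange 0 (idxs.length : Int) 1).foldl (fun acc a =>
        (PySem.List.pyRange (a + 1) (idxs.length : Int) 1).foldl (fun acc b =>
          acc ++ [(PySem.List.pyGetD idxs a 0, PySem.List.pyGetD idxs b 0)]) acc) acc) []
  let cnt : PySem.Dict (Int × Int) Int :=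
    pairs.foldl (fun d p => d.insert p (d.getD p 0 + 1)) PySem.Dict.empty
  -- cnt[(i, j)]: the key is always present (it comes from sorted(cnt)), so getD is exact here
  (PySem.List.sorted2 cnt.keys (fun p => p.1) (fun p => p.2)).foldl (fun acc p =>
    if cnt.getD p 0 = 2 then
      acc ++ [(PySem.List.pyGetD triangles p.1 [], PySem.List.pyGetD triangles p.2 [])]
    else acc) []

-- ===== PRECONDITION & SPEC =====
def Spec_find_adjacent_triangles (triangles : List (List Int)) (out : List (List Int × List Int)) : Prop := out = find_adjacent_triangles_alt triangles
instance (triangles : List (List Int)) (out : List (List Int × List Int)) : Decidable (Spec_find_adjacent_triangles triangles out) := by unfold Spec_find_adjacent_triangles; infer_instance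

-- ===== CLAIM (what is proved, stated in full; the proofs are below) =====
def Claim_equal_find_adjacent_triangles : Prop := ∀ (triangles : List (List Int)), Dom_find_adjacent_triangles triangles → Spec_find_adjacent_triangles triangles (find_adjacent_triangles triangles)

-- ===== LEMMAS AND PROOFS =====

-- all ordered pairs (xs[a], xs[b]) with a < b, in lexicographic index order
def opairs {α : Type} : List α → List (α × α)
  | [] => []
  | x :: xs => xs.map (fun y => (x, y)) ++ opairs xs

-- 'for x in l: if c(x): out.append(f(x))' written as a flatMap of singletons
theorem flatMap_ite_singleton {α β : Type} (l : List α) (c : α → Bool) (f : α → β) :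
    l.flatMap (fun x => if c x then [f x] else []) = (l.filter c).map f := by
  induction l with
  | nil => rfl
  | cons x t ih => by_cases h : c x <;> simp [List.flatMap_cons, h, ih]

-- the double-range loop 'for a in range(n): for b in range(a+1, n): out += g(h a, h b)'
theorem foldl_pairs {α γ : Type} (g : α → α → List γ) :
    ∀ (xs : List α) (off : Int) (h : Int → α)
      (hh : ∀ k : Nat, (hk : k < xs.length) → h (off + k) = xs[k]) (init : List γ),
    (PySem.List.pyRange off (off + xs.length) 1).foldl (fun acc a =>
      (PySem.List.pyRange (a + 1) (off + xs.length) 1).foldl (fun acc b => acc ++ g (h a) (h b)) acc) init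
    = init ++ (opairs xs).flatMap (fun p => g p.1 p.2) := by
  intro xs
  induction xs with
  | nil => intro off h _ init; simp [PySem.List.pyRange_one_eq_nil, opairs]
  | cons x t ih =>
    intro off h hh init
    have hb : off + ((x :: t).length : Int) = (off + 1) + (t.length : Int) := by
      simp [List.length_cons]; ring
    rw [hb, PySem.List.pyRange_one_cons (by omega)]
    rw [List.foldl_cons]
    have hx : h off = x := by
      have := hh 0 (by simp)
      simpa using this
    have hmap : (PySem.List.pyRange (off + 1) (off + 1 + (t.length : Int)) 1).map h = t := by
      apply List.ext_getElem
      · simp [PySem.List.length_pyRange_one]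
      · intro k hk1 hk2
        simp only [List.getElem_map]
        rw [PySem.List.getElem_pyRange_one]
        have : off + 1 + (k : Int) = off + ((k + 1 : Nat) : Int) := by push_cast; ring
        rw [this, hh (k + 1) (by simpa using hk2)]
        simp
    have hflat : (PySem.List.pyRange (off + 1) (off + 1 + (t.length : Int)) 1).flatMap
        (fun b => g x (h b)) = t.flatMap (g x) := by
      conv_rhs => rw [← hmap]
      rw [List.flatMap_map]
    have hinner : (PySem.List.pyRange (off + 1) (off + 1 + (t.length : Int)) 1).foldl
        (fun acc b => acc ++ g (h off) (h b)) init = init ++ t.flatMap (g x) := by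
      rw [PySem.List.foldl_append_eq_flatMap]
      simp only [hx]
      rw [hflat]
    rw [hinner]
    rw [ih (off + 1) h (by
      intro k hk
      have : off + 1 + (k : Int) = off + ((k + 1 : Nat) : Int) := by push_cast; ring
      rw [this, hh (k + 1) (by simpa using hk)]
      simp) (init ++ t.flatMap (g x))]
    simp [opairs, List.flatMap_append, List.flatMap_map]

theorem foldl_pairs_zero {α γ : Type} (g : α → α → List γ) (xs : List α) (c : Int)
    (hc : c = (xs.length : Int)) (h : Int → α)
    (hh : ∀ k : Nat, (hk : k < xs.length) → h k = xs[k]) (init : List γ) :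
    (PySem.List.pyRange 0 c 1).foldl (fun acc a =>
      (PySem.List.pyRange (a + 1) c 1).foldl (fun acc b => acc ++ g (h a) (h b)) acc) init
    = init ++ (opairs xs).flatMap (fun p => g p.1 p.2) := by
  subst hc
  have := foldl_pairs g xs 0 h (by intro k hk; rw [zero_add]; exact hh k hk) init
  simpa using this

theorem mem_opairs {xs : List Int} (hx : xs.Pairwise (· < ·)) (p : Int × Int) :
    p ∈ opairs xs ↔ p.1 ∈ xs ∧ p.2 ∈ xs ∧ p.1 < p.2 := by
  induction xs with
  | nil => simp [opairs]
  | cons x t ih =>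
    rcases (List.pairwise_cons.mp hx) with ⟨hxt, ht⟩
    unfold opairs
    constructor
    · intro hp
      rcases List.mem_append.mp hp with h1 | h1
      · rcases List.mem_map.mp h1 with ⟨y, hy, rfl⟩
        exact ⟨by simp, by simp [hy], hxt y hy⟩
      · rcases (ih ht).mp h1 with ⟨h2, h3, h4⟩
        exact ⟨by simp [h2], by simp [h3], h4⟩
    · rintro ⟨h1, h2, h3⟩
      rcases List.mem_cons.mp h1 with h1' | h1'
      · have h2' : p.2 ∈ t := by
          rcases List.mem_cons.mp h2 with h4 | h4
          · exact absurd h3 (by rw [h1', h4]; omega)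
          · exact h4
        refine List.mem_append.mpr (Or.inl (List.mem_map.mpr ⟨p.2, h2', ?_⟩))
        rw [← h1']
      · have h2' : p.2 ∈ t := by
          rcases List.mem_cons.mp h2 with h4 | h4
          · exact absurd (hxt p.1 h1') (by rw [h4] at h3; omega)
          · exact h4
        exact List.mem_append.mpr (Or.inr ((ih ht).mpr ⟨h1', h2', h3⟩))

-- lexicographic order on the pairs produced by opairs of a strictly increasing list
theorem pairwise_opairs {xs : List Int} (hx : xs.Pairwise (· < ·)) :
    (opairs xs).Pairwise (fun p q => (toLex p : Lex (Int × Int)) < toLex q) := by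
  induction xs with
  | nil => exact List.Pairwise.nil
  | cons x t ih =>
    rcases (List.pairwise_cons.mp hx) with ⟨hxt, ht⟩
    unfold opairs
    apply List.pairwise_append.mpr
    refine ⟨?_, ih ht, ?_⟩
    · exact (List.pairwise_map).mpr (ht.imp (by
        intro a b hab
        rw [Prod.Lex.lt_iff]; right; exact ⟨rfl, hab⟩))
    · intro p hp q hq
      rcases List.mem_map.mp hp with ⟨y, _, rfl⟩
      have hq1 : x < q.1 := hxt q.1 ((mem_opairs ht q).mp hq).1
      rw [Prod.Lex.lt_iff]; left; exact hq1

theorem nodup_opairs {xs : List Int} (hx : xs.Pairwise (· < ·)) : (opairs xs).Nodup := by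
  refine (pairwise_opairs hx).imp ?_
  intro p q hpq
  rw [Prod.Lex.lt_iff] at hpq
  rcases p with ⟨a, b⟩; rcases q with ⟨c, d⟩
  simp at hpq ⊢
  omega

theorem count_opairs {xs : List Int} (hx : xs.Pairwise (· < ·)) (p : Int × Int) :
    (opairs xs).count p = if p.1 ∈ xs ∧ p.2 ∈ xs ∧ p.1 < p.2 then 1 else 0 := by
  split
  · exact List.count_eq_one_of_mem (nodup_opairs hx) ((mem_opairs hx p).mpr (by assumption))
  · exact List.count_eq_zero_of_not_mem (fun hm => absurd ((mem_opairs hx p).mp hm) (by assumption))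

-- a sum of 0/1 indicators is a countP
theorem sum_map_ite_countP {α : Type} (l : List α) (c : α → Bool) :
    (l.map (fun x => if c x then (1 : Nat) else 0)).sum = l.countP c := by
  induction l with
  | nil => rfl
  | cons x t ih => by_cases h : c x <;> simp [h, ih] <;> omega

-- sorted2 with fst/snd keys is sorted with the lexicographic key
theorem sorted2_eq_sorted_lex (xs : List (Int × Int)) :
    PySem.List.sorted2 xs (fun p => p.1) (fun p => p.2) =
    PySem.List.sorted xs (fun p => (toLex p : Lex (Int × Int))) := by
  show List.foldl _ [] xs = List.foldl _ [] xs
  have : (fun (a b : Int × Int) => decide (a.1 < b.1) || (!decide (b.1 < a.1) && decide (a.2 < b.2)))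
       = (fun (a b : Int × Int) => decide ((toLex a : Lex (Int × Int)) < toLex b)) := by
    funext a b
    have hiff : ((toLex a : Lex (Int × Int)) < toLex b) ↔ (a.1 < b.1 ∨ a.1 = b.1 ∧ a.2 < b.2) :=
      Prod.Lex.lt_iff
    by_cases h : (toLex a : Lex (Int × Int)) < toLex b
    · rw [hiff] at h
      by_cases h1 : a.1 < b.1 <;> by_cases h2 : b.1 < a.1 <;> by_cases h3 : a.2 < b.2 <;>
        simp [h1, h2, h3, hiff] <;> omega
    · rw [hiff] at h
      by_cases h1 : a.1 < b.1 <;> by_cases h2 : b.1 < a.1 <;> by_cases h3 : a.2 < b.2 <;>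
        simp [h1, h2, h3, hiff] <;> omega
  rw [this]

-- abbreviations used by the proofs
def pvTri (triangles : List (List Int)) (i : Int) : List Int := PySem.List.pyGetD triangles i []

def pvCondA (triangles : List (List Int)) (p : Int × Int) : Bool :=
  decide (PySem.Set.len (PySem.Set.inter (PySem.Set.ofList (pvTri triangles p.1))
    (PySem.Set.ofList (pvTri triangles p.2))) = 2)

def pvAP (triangles : List (List Int)) : List (Int × Int) :=
  opairs (PySem.List.pyRange 0 (triangles.length : Int) 1)

def pvIncs (triangles : List (List Int)) : List (Int × Int) :=
  (PySem.List.enumerate triangles 0).flatMap (fun e => (PySem.List.dedup e.2).map (fun v => (v, e.1)))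

def pvOwn (triangles : List (List Int)) (v : Int) : List Int :=
  ((pvIncs triangles).filter (fun p => p.1 == v)).map (fun p => p.2)

def pvV (triangles : List (List Int)) : List Int :=
  PySem.Set.ofList ((pvIncs triangles).map (fun p => p.1))

def pvPairs (triangles : List (List Int)) : List (Int × Int) :=
  (pvV triangles).flatMap (fun v => opairs (pvOwn triangles v))

theorem mem_pvAP (triangles : List (List Int)) (p : Int × Int) :
    p ∈ pvAP triangles ↔ 0 ≤ p.1 ∧ p.1 < p.2 ∧ p.2 < (triangles.length : Int) := by
  rw [pvAP, mem_opairs (PySem.List.pairwise_lt_pyRange_one _ _)]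
  simp only [PySem.List.mem_pyRange_one]
  omega

theorem A_char (triangles : List (List Int)) :
    find_adjacent_triangles triangles =
    ((pvAP triangles).filter (pvCondA triangles)).map
      (fun p => (pvTri triangles p.1, pvTri triangles p.2)) := by
  simp only [find_adjacent_triangles]
  have step1 : (PySem.List.pyRange 0 (triangles.length : Int) 1).foldl (fun acc i =>
      (PySem.List.pyRange (i + 1) (triangles.length : Int) 1).foldl (fun acc j =>
        if PySem.Set.len (PySem.Set.inter (PySem.Set.ofList (PySem.List.pyGetD triangles i []))
            (PySem.Set.ofList (PySem.List.pyGetD triangles j []))) = 2 then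
          acc ++ [(PySem.List.pyGetD triangles i [], PySem.List.pyGetD triangles j [])]
        else acc) acc) ([] : List (List Int × List Int))
    = (PySem.List.pyRange 0 (triangles.length : Int) 1).foldl (fun acc i =>
      (PySem.List.pyRange (i + 1) (triangles.length : Int) 1).foldl (fun acc j =>
        acc ++ (if pvCondA triangles (i, j) then [(pvTri triangles i, pvTri triangles j)] else [])) acc) [] := by
    refine PySem.List.foldl_congr_mem _ _ _ _ ?_
    intro acc i _
    refine PySem.List.foldl_congr_mem _ _ _ _ ?_
    intro acc' j _
    simp only [pvCondA, pvTri]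
    split
    · rename_i hcond
      rw [if_pos (by simpa using hcond)]
    · rename_i hcond
      rw [if_neg (by simpa using hcond), List.append_nil]
  rw [step1]
  rw [foldl_pairs_zero (fun i j => if pvCondA triangles (i, j) then [(pvTri triangles i, pvTri triangles j)] else [])
    (PySem.List.pyRange 0 (triangles.length : Int) 1) (triangles.length : Int)
    (by simp [PySem.List.length_pyRange_one]) (fun z => z)
    (by intro k hk; rw [PySem.List.getElem_pyRange_one]; simp) []]
  rw [List.nil_append]
  have : (fun p : Int × Int => if pvCondA triangles (p.1, p.2) then [(pvTri triangles p.1, pvTri triangles p.2)] else [])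
       = (fun p : Int × Int => if pvCondA triangles p then [(pvTri triangles p.1, pvTri triangles p.2)] else []) := by
    funext p; rw [Prod.mk.eta]
  rw [this, flatMap_ite_singleton, pvAP]

theorem owners_spec (triangles : List (List Int)) :
    ((PySem.List.enumerate triangles 0).foldl (fun d e =>
      (PySem.List.dedup e.2).foldl (fun d v => d.insert v (d.getD v [] ++ [e.1])) d)
        (PySem.Dict.empty : PySem.Dict Int (List Int)))
    = (pvIncs triangles).foldl (fun d p => d.modify p.1 [] (· ++ [p.2])) PySem.Dict.empty := by
  rw [pvIncs, List.foldl_flatMap]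
  refine PySem.List.foldl_congr_mem _ _ _ _ ?_
  intro d e _
  rw [List.foldl_map]
  refine PySem.List.foldl_congr_mem _ _ _ _ ?_
  intro d' v _
  simp [PySem.Dict.modify]

theorem own_char (triangles : List (List Int)) (v : Int) :
    pvOwn triangles v =
    (((PySem.List.enumerate triangles 0).filter
        (fun e => decide (v ∈ PySem.List.dedup e.2))).map (fun e => e.1)) := by
  rw [pvOwn, pvIncs, List.filter_flatMap, List.map_flatMap]
  rw [← flatMap_ite_singleton (PySem.List.enumerate triangles 0)
    (fun e => decide (v ∈ PySem.List.dedup e.2)) (fun e => e.1)]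
  refine List.flatMap_congr ?_
  intro e _
  rw [List.filter_map]
  have : (fun u : Int => ((fun p : Int × Int => p.1 == v) ((fun u => (u, e.1)) u)))
       = (fun u : Int => u == v) := rfl
  rw [show ((fun p : Int × Int => p.1 == v) ∘ (fun u => (u, e.1))) = (fun u : Int => u == v) from rfl]
  rw [List.filter_beq]
  by_cases hv : v ∈ PySem.List.dedup e.2
  · have hv2 : v ∈ e.2 := by
      rw [PySem.List.dedup_eq_ofList, PySem.Set.mem_ofList] at hv; exact hv
    rw [List.count_eq_one_of_mem (by rw [PySem.List.dedup_eq_ofList]; exact PySem.Set.nodup_ofList _) hv]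
    simp [hv2]
  · have hv2 : v ∉ e.2 := by
      rw [PySem.List.dedup_eq_ofList, PySem.Set.mem_ofList] at hv; exact hv
    rw [List.count_eq_zero_of_not_mem hv]
    simp [hv2]

theorem pairwise_own (triangles : List (List Int)) (v : Int) :
    (pvOwn triangles v).Pairwise (· < ·) := by
  rw [own_char]
  exact ((PySem.List.pairwise_lt_enumerate triangles 0).filter _).map _ (fun a b h => h)

theorem pvTri_natCast (triangles : List (List Int)) (k : Nat) (hk : k < triangles.length) :
    pvTri triangles (k : Int) = triangles[k] := by
  rw [pvTri, PySem.List.pyGetD_natCast]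
  exact List.getD_eq_getElem _ _ hk

theorem mem_own_iff (triangles : List (List Int)) (v i : Int)
    (h0 : 0 ≤ i) (hn : i < (triangles.length : Int)) :
    i ∈ pvOwn triangles v ↔ v ∈ PySem.Set.ofList (pvTri triangles i) := by
  have hk : i.toNat < triangles.length := by omega
  have hi : i = ((i.toNat : Nat) : Int) := by omega
  rw [own_char]
  simp only [List.mem_map, List.mem_filter, PySem.List.mem_enumerate_iff]
  constructor
  · rintro ⟨e, ⟨⟨k, hkk, rfl⟩, hv⟩, h1⟩
    simp only [zero_add] at h1 hv
    simp only [decide_eq_true_eq, PySem.List.dedup_eq_ofList] at hv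
    rw [← h1, pvTri_natCast triangles k hkk]
    exact hv
  · intro hv
    rw [hi, pvTri_natCast triangles i.toNat hk] at hv
    refine ⟨((i.toNat : Int), triangles[i.toNat]), ⟨⟨i.toNat, hk, by rw [zero_add]⟩, ?_⟩, by omega⟩
    simp only [decide_eq_true_eq, PySem.List.dedup_eq_ofList]
    exact hv

theorem mem_own_bounds (triangles : List (List Int)) (v i : Int) (h : i ∈ pvOwn triangles v) :
    0 ≤ i ∧ i < (triangles.length : Int) := by
  rw [own_char] at h
  rcases List.mem_map.mp h with ⟨e, he, rfl⟩
  rcases (PySem.List.mem_enumerate_iff _ _ _).mp (List.mem_filter.mp he).1 with ⟨k, hk, rfl⟩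
  simp
  omega

theorem mem_V (triangles : List (List Int)) (v i : Int)
    (h0 : 0 ≤ i) (hn : i < (triangles.length : Int))
    (hv : v ∈ PySem.Set.ofList (pvTri triangles i)) : v ∈ pvV triangles := by
  have hk : i.toNat < triangles.length := by omega
  have hi : i = ((i.toNat : Nat) : Int) := by omega
  rw [hi, pvTri_natCast triangles i.toNat hk] at hv
  rw [pvV, PySem.Set.mem_ofList, List.mem_map]
  refine ⟨(v, ((i.toNat : Nat) : Int)), ?_, rfl⟩
  rw [pvIncs, List.mem_flatMap]
  refine ⟨(((i.toNat : Nat) : Int), triangles[i.toNat]),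
    (PySem.List.mem_enumerate_iff _ _ _).mpr ⟨i.toNat, hk, by rw [zero_add]⟩, ?_⟩
  rw [List.mem_map]
  refine ⟨v, ?_, rfl⟩
  rw [PySem.List.dedup_eq_ofList, PySem.Set.mem_ofList]
  show v ∈ triangles[i.toNat]
  exact (PySem.Set.mem_ofList _ _).mp hv

theorem pairs_sub_AP (triangles : List (List Int)) (p : Int × Int)
    (hp : p ∈ pvPairs triangles) : p ∈ pvAP triangles := by
  rcases List.mem_flatMap.mp hp with ⟨v, _, hpo⟩
  rcases (mem_opairs (pairwise_own triangles v) p).mp hpo with ⟨h1, h2, h3⟩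
  have b1 := mem_own_bounds triangles v p.1 h1
  have b2 := mem_own_bounds triangles v p.2 h2
  rw [mem_pvAP]
  omega

theorem count_pairs (triangles : List (List Int)) (p : Int × Int) (hp : p ∈ pvAP triangles) :
    (pvPairs triangles).count p =
    (PySem.Set.inter (PySem.Set.ofList (pvTri triangles p.1))
      (PySem.Set.ofList (pvTri triangles p.2))).length := by
  rcases (mem_pvAP triangles p).mp hp with ⟨hb0, hb1, hb2⟩
  rw [pvPairs, List.count_flatMap]
  have hmap : ((pvV triangles).map (List.count p ∘ fun v => opairs (pvOwn triangles v)))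
      = (pvV triangles).map (fun v =>
          if (decide (v ∈ PySem.Set.ofList (pvTri triangles p.1)) &&
              decide (v ∈ PySem.Set.ofList (pvTri triangles p.2)) : Bool) then (1 : Nat) else 0) := by
    refine List.map_congr_left ?_
    intro v _
    simp only [Function.comp]
    rw [count_opairs (pairwise_own triangles v)]
    by_cases h1 : v ∈ PySem.Set.ofList (pvTri triangles p.1) <;>
      by_cases h2 : v ∈ PySem.Set.ofList (pvTri triangles p.2) <;>
      simp [h1, h2, mem_own_iff triangles v p.1 hb0 (by omega),
        mem_own_iff triangles v p.2 (by omega) hb2] <;> omega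
  rw [hmap, sum_map_ite_countP]
  -- countP over pvV equals countP over S p.1 (both count the same finite set of vertices)
  have hperm : ((pvV triangles).filter (fun v =>
        decide (v ∈ PySem.Set.ofList (pvTri triangles p.1)) &&
        decide (v ∈ PySem.Set.ofList (pvTri triangles p.2)))).Perm
      ((PySem.Set.ofList (pvTri triangles p.1)).filter (fun v =>
        (PySem.Set.ofList (pvTri triangles p.2)).contains v)) := by
    refine (List.perm_ext_iff_of_nodup
      (List.Nodup.filter _ (PySem.Set.nodup_ofList _))
      (List.Nodup.filter _ (PySem.Set.nodup_ofList _))).mpr ?_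
    intro v
    simp only [List.mem_filter, Bool.and_eq_true, decide_eq_true_eq, PySem.Set.contains_iff]
    constructor
    · rintro ⟨_, h1, h2⟩; exact ⟨h1, h2⟩
    · rintro ⟨h1, h2⟩
      exact ⟨mem_V triangles v p.1 hb0 (by omega) h1, h1, h2⟩
  rw [List.countP_eq_length_filter, hperm.length_eq, PySem.Set.inter]

theorem B_char (triangles : List (List Int)) :
    find_adjacent_triangles_alt triangles =
    (((pvAP triangles).filter (fun p => decide (p ∈ pvPairs triangles))).filter
        (fun p => decide (((pvPairs triangles).count p : Int) = 2))).map
      (fun p => (pvTri triangles p.1, pvTri triangles p.2)) := by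
  simp only [find_adjacent_triangles_alt]
  rw [owners_spec]
  have hkeys : ((pvIncs triangles).foldl (fun d p => d.modify p.1 [] (· ++ [p.2]))
      (PySem.Dict.empty : PySem.Dict Int (List Int))).keys = pvV triangles := by
    rw [PySem.Dict.keys_foldl_modify_key (pvIncs triangles) (fun p => p.1) []
      (fun _ p => (· ++ [p.2])) PySem.Dict.empty]
    rfl
  have hnodup : ((pvIncs triangles).foldl (fun d p => d.modify p.1 [] (· ++ [p.2]))
      (PySem.Dict.empty : PySem.Dict Int (List Int))).keys.Nodup := by
    exact PySem.Dict.nodup_keys_foldl_modify_key (pvIncs triangles) (fun p : Int × Int => p.1) []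
      (fun _ p => (· ++ [p.2])) PySem.Dict.empty (by exact List.nodup_nil)
  have hvals : ((pvIncs triangles).foldl (fun d p => d.modify p.1 [] (· ++ [p.2]))
      (PySem.Dict.empty : PySem.Dict Int (List Int))).values = (pvV triangles).map (pvOwn triangles) := by
    rw [PySem.Dict.values_eq_map_keys _ hnodup [], hkeys]
    refine List.map_congr_left ?_
    intro v _
    rw [PySem.Dict.getD_foldl_modify_append (pvIncs triangles) PySem.Dict.empty v]
    rw [pvOwn]
    rfl
  rw [hvals]
  have hpairs : ((pvV triangles).map (pvOwn triangles)).foldl (fun acc idxs =>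
      (PySem.List.pyRange 0 (idxs.length : Int) 1).foldl (fun acc a =>
        (PySem.List.pyRange (a + 1) (idxs.length : Int) 1).foldl (fun acc b =>
          acc ++ [(PySem.List.pyGetD idxs a 0, PySem.List.pyGetD idxs b 0)]) acc) acc) []
      = pvPairs triangles := by
    have hbody : ∀ (acc : List (Int × Int)), ∀ idxs ∈ (pvV triangles).map (pvOwn triangles),
        (PySem.List.pyRange 0 (idxs.length : Int) 1).foldl (fun acc a =>
          (PySem.List.pyRange (a + 1) (idxs.length : Int) 1).foldl (fun acc b =>
            acc ++ [(PySem.List.pyGetD idxs a 0, PySem.List.pyGetD idxs b 0)]) acc) acc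
        = acc ++ opairs idxs := by
      intro acc idxs _
      rw [foldl_pairs_zero (fun i j => [(i, j)]) idxs (idxs.length : Int) rfl
        (fun a => PySem.List.pyGetD idxs a 0)
        (by intro k hk
            show PySem.List.pyGetD idxs ((k : Nat) : Int) 0 = idxs[k]
            rw [PySem.List.pyGetD_natCast, List.getD_eq_getElem _ _ hk]) acc]
      congr 1
      have : (fun p : Int × Int => [(p.1, p.2)]) = (fun p : Int × Int => [p]) := by
        funext p; rw [Prod.mk.eta]
      rw [this, List.flatMap_singleton']
    rw [PySem.List.foldl_congr_mem _ _ (fun acc idxs => acc ++ opairs idxs) _ hbody]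
    rw [PySem.List.foldl_append_eq_flatMap, List.nil_append, List.flatMap_map, pvPairs]
  rw [hpairs]
  rw [PySem.Dict.foldl_insert_getD_add_one_eq_counter]
  have hfinal : (PySem.List.sorted2 (PySem.Dict.counter (pvPairs triangles)).keys
      (fun p => p.1) (fun p => p.2)).foldl (fun acc p =>
        if (PySem.Dict.counter (pvPairs triangles)).getD p 0 = 2 then
          acc ++ [(PySem.List.pyGetD triangles p.1 [], PySem.List.pyGetD triangles p.2 [])]
        else acc) []
      = (PySem.List.sorted2 (PySem.Dict.counter (pvPairs triangles)).keys
      (fun p => p.1) (fun p => p.2)).foldl (fun acc p =>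
        if (((pvPairs triangles).count p : Int) = 2) then
          acc ++ [(pvTri triangles p.1, pvTri triangles p.2)]
        else acc) [] := by
    refine PySem.List.foldl_congr_mem _ _ _ _ ?_
    intro acc q _
    rw [PySem.Dict.getD_counter]
    rfl
  rw [hfinal]
  have hsorted : PySem.List.sorted2 (PySem.Dict.counter (pvPairs triangles)).keys
      (fun p => p.1) (fun p => p.2)
      = (pvAP triangles).filter (fun p => decide (p ∈ pvPairs triangles)) := by
    rw [sorted2_eq_sorted_lex, PySem.Dict.keys_counter]
    refine PySem.List.sorted_eq_of_perm_of_pairwise_lt _ _ _ ?_ ?_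
    · refine (List.perm_ext_iff_of_nodup ?_ (PySem.Set.nodup_ofList _)).mpr ?_
      · exact List.Nodup.filter _ (nodup_opairs (PySem.List.pairwise_lt_pyRange_one _ _))
      · intro q
        simp only [List.mem_filter, decide_eq_true_eq, PySem.Set.mem_ofList]
        constructor
        · rintro ⟨_, h⟩; exact h
        · intro h; exact ⟨pairs_sub_AP triangles q h, h⟩
    · exact (pairwise_opairs (PySem.List.pairwise_lt_pyRange_one _ _)).filter _
  rw [hsorted]
  rw [PySem.List.foldl_append_ite (fun p : Int × Int => (((pvPairs triangles).count p : Int) = 2))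
    (fun p => (pvTri triangles p.1, pvTri triangles p.2)) _ []]
  rw [List.nil_append]

-- ===== VERDICT (by name: the statement is the Claim_ definition above) =====
theorem find_adjacent_triangles_spec : Claim_equal_find_adjacent_triangles := by
  intro triangles _
  show find_adjacent_triangles triangles = find_adjacent_triangles_alt triangles
  rw [A_char, B_char, List.filter_filter]
  congr 1
  refine List.filter_congr ?_
  intro p hp
  have hc := count_pairs triangles p hp
  have hlen : (PySem.Set.len (PySem.Set.inter (PySem.Set.ofList (pvTri triangles p.1))
      (PySem.Set.ofList (pvTri triangles p.2))) = (2 : Int)) ↔ ((pvPairs triangles).count p = 2) := by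
    rw [PySem.Set.len, ← hc]
    exact ⟨fun h => by exact_mod_cast h, fun h => by exact_mod_cast h⟩
  rw [pvCondA]
  by_cases h2 : (pvPairs triangles).count p = 2
  · have hmem : p ∈ pvPairs triangles := List.count_pos_iff.mp (by omega)
    rw [decide_eq_true (hlen.mpr h2),
      decide_eq_true (show (((pvPairs triangles).count p : Int) = 2) by exact_mod_cast h2),
      decide_eq_true hmem]
    rfl
  · rw [decide_eq_false (fun h => h2 (hlen.mp h)),
      decide_eq_false (show ¬ (((pvPairs triangles).count p : Int) = 2) from fun h => h2 (by exact_mod_cast h))]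
    rfl
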